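-- pv_equiv track=rewrite | github.com/n3bch4S/algor-lab | lab10/helper.py | variableFrom
-- ===== SOURCE A (Python) =====
-- def variableFrom(matrix: list[list[int]]) -> tuple[int, list[int]]:
--     variableList = []
--     for row in matrix:
--         for num in row:
--             if num < 0:
--                 num *= -1
--             if num not in variableList:
--                 variableList.append(num)
--     variableList.sort()
--     return len(variableList), variableList
-- ===== SOURCE B (Python) =====
-- def variableFrom(matrix: list[list[int]]) -> tuple[int, list[int]]:
--     flat = [abs(num) for row in matrix for num in row]
--     flat.sort()
--     result = []
--     for x in flat:
--         if not result or result[-1] != x: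
--             result.append(x)
--     return len(result), result
-- ===== Notes on version B (the rewrite author's own statement) =====
-- stated objective: faster
-- what changed: A dedups with an O(k) 'not in' membership scan per matrix entry and sorts at the end; B flattens all absolute values with no membership test, sorts once, and removes duplicates in a single adjacent-equality pass over the sorted list.
import Mathlib
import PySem

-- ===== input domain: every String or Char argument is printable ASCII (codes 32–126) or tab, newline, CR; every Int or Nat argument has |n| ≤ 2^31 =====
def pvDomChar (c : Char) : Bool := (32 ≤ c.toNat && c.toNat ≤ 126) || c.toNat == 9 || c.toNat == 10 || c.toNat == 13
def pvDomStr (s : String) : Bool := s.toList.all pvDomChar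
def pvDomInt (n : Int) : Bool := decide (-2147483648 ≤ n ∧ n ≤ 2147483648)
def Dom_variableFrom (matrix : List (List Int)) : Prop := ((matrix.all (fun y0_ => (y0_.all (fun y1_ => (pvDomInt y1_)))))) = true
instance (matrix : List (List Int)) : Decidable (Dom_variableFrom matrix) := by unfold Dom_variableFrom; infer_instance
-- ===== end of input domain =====

-- B replaces A's quadratic membership-scan dedup by flatten + sort + one adjacent-dedup pass (objective: faster, O(n log n) vs O(n^2)).

-- ===== PORT A =====
def variableFrom (matrix : List (List Int)) : Int × List Int :=
  let variableList : PySem.Set Int :=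
    matrix.foldl (fun acc row =>
      row.foldl (fun acc num =>
        let num := if num < 0 then num * -1 else num
        PySem.Set.add acc num) acc) PySem.Set.empty
  let variableList := PySem.List.sorted variableList (fun x => x) false
  ((variableList.length : Int), variableList)

-- ===== PORT B =====
def variableFrom_alt (matrix : List (List Int)) : Int × List Int :=
  let flat := matrix.flatMap (fun row => row.map (fun num => |num|))
  let flat := PySem.List.sorted flat (fun x => x) false
  let result := flat.foldl (fun result x =>
      if result = [] ∨ result.getLast? ≠ some x then result ++ [x] else result) []
  ((result.length : Int), result)

-- ===== PRECONDITION & SPEC =====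
def Spec_variableFrom (matrix : List (List Int)) (out : Int × List Int) : Prop := out = variableFrom_alt matrix
instance (matrix : List (List Int)) (out : Int × List Int) : Decidable (Spec_variableFrom matrix out) := by unfold Spec_variableFrom; infer_instance

-- ===== CLAIM (what is proved, stated in full; the proofs are below) =====
def Claim_equal_variableFrom : Prop := ∀ (matrix : List (List Int)), Dom_variableFrom matrix → Spec_variableFrom matrix (variableFrom matrix)

-- ===== LEMMAS AND PROOFS =====

-- for a ≤-sorted list, every element is ≤ the last one
theorem pv_le_getLast {acc : List Int} {l a : Int}
    (h : acc.Pairwise (· ≤ ·)) (hl : acc.getLast? = some l) (ha : a ∈ acc) : a ≤ l := by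
  induction acc with
  | nil => cases ha
  | cons b t ih =>
    cases t with
    | nil =>
      simp at hl ha; omega
    | cons c u =>
      rw [List.getLast?_cons_cons] at hl
      rcases List.mem_cons.mp ha with rfl | ha'
      · exact le_trans (List.rel_of_pairwise_cons h (List.mem_of_getLast? hl))
          (le_refl l) |>.trans (le_refl l) |>.trans (le_refl l)
      · exact ih h.of_cons hl ha'

-- invariant of B's adjacent-dedup fold over a ≤-sorted input
theorem pv_dedup_loop (s : List Int) : ∀ (acc : List Int),
    s.Pairwise (· ≤ ·) → acc.Pairwise (· < ·) →
    (∀ l, acc.getLast? = some l → ∀ y ∈ s, l ≤ y) →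
    (s.foldl (fun result x =>
        if result = [] ∨ result.getLast? ≠ some x then result ++ [x] else result) acc).Pairwise (· < ·) ∧
    ∀ x, x ∈ s.foldl (fun result x =>
        if result = [] ∨ result.getLast? ≠ some x then result ++ [x] else result) acc ↔ x ∈ acc ∨ x ∈ s := by
  induction s with
  | nil => intro acc _ hacc _; simpa using hacc
  | cons x s' ih =>
    intro acc hs hacc hle
    have hs' : s'.Pairwise (· ≤ ·) := hs.of_cons
    have hxle : ∀ y ∈ s', x ≤ y := fun y hy => List.rel_of_pairwise_cons hs hy
    simp only [List.foldl_cons]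
    by_cases hc : acc = [] ∨ acc.getLast? ≠ some x
    · rw [if_pos hc]
      have hlt : ∀ a ∈ acc, a < x := by
        intro a ha
        rcases hc with rfl | hne
        · cases ha
        · have hne' : acc ≠ [] := fun h => by simp [h] at ha
          obtain ⟨l, hl⟩ : ∃ l, acc.getLast? = some l := by
            cases h : acc.getLast? with
            | none => exact absurd (List.getLast?_eq_none_iff.mp h) hne'
            | some l => exact ⟨l, rfl⟩
          have h1 : a ≤ l := pv_le_getLast (hacc.imp le_of_lt) hl ha
          have h2 : l ≤ x := hle l hl x (List.mem_cons_self)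
          have h3 : l ≠ x := fun h => hne (h ▸ hl)
          omega
      have hacc' : (acc ++ [x]).Pairwise (· < ·) := by
        rw [List.pairwise_append]
        exact ⟨hacc, List.pairwise_singleton _ _, fun a ha b hb => by
          simp at hb; exact hb ▸ hlt a ha⟩
      have hle' : ∀ l, (acc ++ [x]).getLast? = some l → ∀ y ∈ s', l ≤ y := by
        intro l hl y hy
        rw [List.getLast?_concat] at hl
        cases hl; exact hxle y hy
      obtain ⟨hp, hm⟩ := ih (acc ++ [x]) hs' hacc' hle'
      refine ⟨hp, fun z => ?_⟩
      rw [hm z]; simp [or_assoc]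
    · rw [if_neg hc]
      push Not at hc
      obtain ⟨hne, hlast⟩ := hc
      have hxmem : x ∈ acc := List.mem_of_getLast? hlast
      have hle' : ∀ l, acc.getLast? = some l → ∀ y ∈ s', l ≤ y := by
        intro l hl y hy
        rw [hlast] at hl; cases hl; exact hxle y hy
      obtain ⟨hp, hm⟩ := ih acc hs' hacc hle'
      refine ⟨hp, fun z => ?_⟩
      rw [hm z]; simp only [List.mem_cons]
      constructor
      · rintro (h | h); exacts [Or.inl h, Or.inr (Or.inr h)]
      · rintro (h | rfl | h); exacts [Or.inl h, Or.inl hxmem, Or.inr h]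

-- A's nested accumulation IS set(abs-values of the flattened matrix), in first-occurrence order
theorem pv_A_list (matrix : List (List Int)) :
    matrix.foldl (fun acc row =>
      row.foldl (fun acc num =>
        let num := if num < 0 then num * -1 else num
        PySem.Set.add acc num) acc) PySem.Set.empty
    = PySem.Set.ofList (matrix.flatMap (fun row => row.map (fun num => |num|))) := by
  rw [PySem.Set.ofList_eq_foldl, List.foldl_flatMap]
  have habs : ∀ (num : Int), (if num < 0 then num * -1 else num) = |num| := by
    intro num
    by_cases h : num < 0
    · rw [if_pos h, abs_of_neg h]; ring
    · rw [if_neg h, abs_of_nonneg (by omega)]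
  simp only [List.foldl_map, habs]
  rfl

theorem variableFrom_spec : Claim_equal_variableFrom := by
  intro matrix _
  unfold Spec_variableFrom variableFrom variableFrom_alt
  simp only
  rw [pv_A_list]
  set flat := matrix.flatMap (fun row => row.map (fun num => |num|)) with hflat
  set fs := PySem.List.sorted flat (fun x => x) false with hfs
  obtain ⟨hpair, hmem⟩ := pv_dedup_loop fs []
    (by simpa using PySem.List.sorted_pairwise flat (fun x => x))
    (List.Pairwise.nil) (by intro l hl; simp at hl)
  set r := fs.foldl (fun result x =>
      if result = [] ∨ result.getLast? ≠ some x then result ++ [x] else result) [] with hr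
  have hreq : PySem.List.sorted (PySem.Set.ofList flat) (fun x => x) false = r := by
    apply PySem.List.sorted_eq_of_perm_of_pairwise_lt
    · apply (List.perm_ext_iff_of_nodup (hpair.imp ne_of_lt) (PySem.Set.nodup_ofList flat)).mpr
      intro a
      rw [hmem a]
      simp only [List.not_mem_nil, false_or, PySem.Set.mem_ofList, hfs, PySem.List.mem_sorted]
    · exact hpair
  rw [hreq]
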